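-- pv_equiv track=rewrite | github.com/jayo60013/aoc_2023 | day10/day10.py | removeNonLoopPipes
-- ===== SOURCE A (Python) =====
-- def removeNonLoopPipes(grid, visited):
--     new_grid = []
--     for r, row in enumerate(grid):
--         new_row = ""
--         for c, sym in enumerate(row):
--             if (r, c) in visited:
--                 new_row += sym
--             else:
--                 new_row += "."
--         new_grid.append(new_row)
--     return new_grid
-- ===== SOURCE B (Python) =====
-- def removeNonLoopPipes(grid, visited):
--     new_grid = [["."] * len(row) for row in grid]
--     for r, c in visited:
--         if 0 <= r < len(grid) and 0 <= c < len(grid[r]):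
--             new_grid[r][c] = grid[r][c]
--     return ["".join(row) for row in new_grid]
-- ===== Notes on version B (the rewrite author's own statement) =====
-- stated objective: faster
-- what changed: Instead of scanning every grid cell and testing (r,c) membership in visited, B pre-builds rows of dots and iterates once over visited, scattering each in-bounds coordinate's grid character into place.
import Mathlib
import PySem

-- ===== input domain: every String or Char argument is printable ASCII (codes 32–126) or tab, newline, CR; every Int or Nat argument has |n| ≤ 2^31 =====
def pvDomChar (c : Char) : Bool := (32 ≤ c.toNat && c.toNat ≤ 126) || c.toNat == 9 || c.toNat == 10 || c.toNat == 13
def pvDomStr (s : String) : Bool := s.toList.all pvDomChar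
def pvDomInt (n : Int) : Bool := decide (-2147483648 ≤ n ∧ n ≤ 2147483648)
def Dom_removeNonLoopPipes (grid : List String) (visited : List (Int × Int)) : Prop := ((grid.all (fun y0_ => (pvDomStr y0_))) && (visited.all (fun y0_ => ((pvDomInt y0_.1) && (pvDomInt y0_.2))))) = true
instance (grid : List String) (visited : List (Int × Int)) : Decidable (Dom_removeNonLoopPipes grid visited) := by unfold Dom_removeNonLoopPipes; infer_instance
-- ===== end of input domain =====

-- B scatters the visited coordinates into a pre-built grid of dots instead of scanning
-- every cell with a membership test over visited (objective: faster when visited is sparse).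


-- ===== PORT A =====
-- literal transliteration: outer loop over enumerate(grid) appending a row string,
-- inner loop over enumerate(row) appending sym or '.' per membership test
def removeNonLoopPipes (grid : List String) (visited : List (Int × Int)) : List String :=
  (PySem.List.enumerate grid).foldl
    (fun new_grid rrow =>
      new_grid ++ [(PySem.List.enumerate rrow.2.toList).foldl
        (fun new_row csym =>
          if (rrow.1, csym.1) ∈ visited then new_row.push csym.2 else new_row.push '.')
        ""])
    []

-- ===== PORT B =====
-- transliteration of Source B: build rows of dots, scatter the in-bounds visited cells, join
def removeNonLoopPipes_alt (grid : List String) (visited : List (Int × Int)) : List String :=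
  let g : List (List Char) := grid.map String.toList
  let filled := visited.foldl
    (fun ng p =>
      -- the Python guard '0 <= r < len(grid) and 0 <= c < len(grid[r])'
      if 0 ≤ p.1 ∧ p.1.toNat < g.length ∧ 0 ≤ p.2 ∧ p.2.toNat < (g.getD p.1.toNat []).length then
        ng.modify p.1.toNat (fun row => row.set p.2.toNat ((g.getD p.1.toNat []).getD p.2.toNat '.'))
      else ng)
    (g.map (fun row => List.replicate row.length '.'))
  filled.map String.ofList

-- ===== PRECONDITION & SPEC =====
def Spec_removeNonLoopPipes (grid : List String) (visited : List (Int × Int)) (out : List String) : Prop := out = removeNonLoopPipes_alt grid visited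
instance (grid : List String) (visited : List (Int × Int)) (out : List String) : Decidable (Spec_removeNonLoopPipes grid visited out) := by unfold Spec_removeNonLoopPipes; infer_instance

-- ===== CLAIM (what is proved, stated in full; the proofs are below) =====
def Claim_equal_removeNonLoopPipes : Prop := ∀ (grid : List String) (visited : List (Int × Int)), Dom_removeNonLoopPipes grid visited → Spec_removeNonLoopPipes grid visited (removeNonLoopPipes grid visited)

-- ===== LEMMAS AND PROOFS =====

-- the step function of B's scatter loop (definitionally the lambda in removeNonLoopPipes_alt)
def scatterF (g : List (List Char)) (ng : List (List Char)) (p : Int × Int) : List (List Char) :=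
  if 0 ≤ p.1 ∧ p.1.toNat < g.length ∧ 0 ≤ p.2 ∧ p.2.toNat < (g.getD p.1.toNat []).length then
    ng.modify p.1.toNat (fun row => row.set p.2.toNat ((g.getD p.1.toNat []).getD p.2.toNat '.'))
  else ng

lemma alt_eq_scatter (grid : List String) (visited : List (Int × Int)) :
    removeNonLoopPipes_alt grid visited
      = (visited.foldl (scatterF (grid.map String.toList))
          ((grid.map String.toList).map (fun row => List.replicate row.length '.'))).map String.ofList := rfl

-- getElem of enumerate
lemma enum_getElem {α : Type} : ∀ (l : List α) (s : Int) (i : Nat) (h : i < l.length),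
    (PySem.List.enumerate l s)[i]'(by simpa [PySem.List.length_enumerate] using h) = (s + i, l[i]) := by
  intro l
  induction l with
  | nil => intro s i h; simp at h
  | cons x xs ih =>
    intro s i h
    cases i with
    | zero => simp [PySem.List.enumerate_cons]
    | succ j =>
      have := ih (s + 1) j (by simpa using Nat.lt_of_succ_lt_succ h)
      simp [PySem.List.enumerate_cons, this]
      ring

-- A's inner loop: folding pushes equals append of the mapped characters
lemma pushfold (visited : List (Int × Int)) (r : Int) :
    ∀ (l : List (Int × Char)) (a : String),
    (l.foldl (fun nr cs => if (r, cs.1) ∈ visited then nr.push cs.2 else nr.push '.') a).toList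
      = a.toList ++ l.map (fun cs => if (r, cs.1) ∈ visited then cs.2 else '.') := by
  intro l
  induction l with
  | nil => intro a; simp
  | cons x xs ih =>
    intro a
    by_cases h : (r, x.1) ∈ visited <;> simp [h, ih]

-- the canonical value of one output row
def targetRow (visited : List (Int × Int)) (r : Int) (row : List Char) : List Char :=
  (PySem.List.enumerate row).map (fun cs => if (r, cs.1) ∈ visited then cs.2 else '.')

lemma length_targetRow (visited : List (Int × Int)) (r : Int) (row : List Char) :
    (targetRow visited r row).length = row.length := by
  simp [targetRow, PySem.List.length_enumerate]

lemma targetRow_getElem (visited : List (Int × Int)) (r : Int) (row : List Char)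
    (c : Nat) (h : c < row.length) :
    (targetRow visited r row)[c]'(by simpa [length_targetRow] using h)
      = if ((r : Int), (c : Int)) ∈ visited then row[c] else '.' := by
  simp [targetRow, enum_getElem row 0 c h]

-- A's port equals the canonical value
lemma a_eq_target (grid : List String) (visited : List (Int × Int)) :
    removeNonLoopPipes grid visited
      = (PySem.List.enumerate grid).map
          (fun rrow => String.ofList (targetRow visited rrow.1 rrow.2.toList)) := by
  unfold removeNonLoopPipes
  rw [PySem.List.foldl_append_singleton_eq_map]
  refine List.map_congr_left ?_
  intro rrow _
  apply String.ext
  rw [pushfold]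
  simp [targetRow]

lemma scatterF_length (g ng : List (List Char)) (p : Int × Int) :
    (scatterF g ng p).length = ng.length := by
  unfold scatterF; split <;> simp

lemma scatterF_rowlen (g ng : List (List Char)) (p : Int × Int) (i : Nat) :
    ((scatterF g ng p).getD i []).length = (ng.getD i []).length := by
  unfold scatterF
  split
  · simp only [List.getD_eq_getElem?_getD, List.getElem?_modify]
    cases h : ng[i]? with
    | none => simp
    | some row => by_cases hi : p.1.toNat = i <;> simp [hi]
  · rfl

-- one write hits its own cell with the grid value …
lemma scatterF_getD_self (g ng : List (List Char)) (r c : Nat)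
    (hlen : ng.length = g.length) (hr : r < g.length) (hc : c < (g.getD r []).length)
    (hrow : c < (ng.getD r []).length) :
    ((scatterF g ng ((r : Int), (c : Int))).getD r []).getD c '.' = (g.getD r []).getD c '.' := by
  have hrlt : r < ng.length := by omega
  have hrow' : c < ng[r].length := by
    simpa [List.getD_eq_getElem?_getD, List.getElem?_eq_getElem hrlt] using hrow
  unfold scatterF
  rw [if_pos (by simpa using ⟨hr, hc⟩)]
  simp [List.getD_eq_getElem?_getD, List.getElem?_eq_getElem hrlt, hrow']

-- … and leaves every other cell alone
lemma scatterF_getD_ne (g ng : List (List Char)) (p : Int × Int) (r c : Nat)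
    (hlen : ng.length = g.length) (hp : p ≠ ((r : Int), (c : Int))) :
    ((scatterF g ng p).getD r []).getD c '.' = (ng.getD r []).getD c '.' := by
  unfold scatterF
  split
  case isTrue hcond =>
    rcases hcond with ⟨hp1, hp2, hp3, hp4⟩
    by_cases hri : p.1.toNat = r
    · have hcne : p.2.toNat ≠ c := by
        intro hcc
        exact hp (by cases p with | mk a b => simp_all; omega)
      have hrlt : r < ng.length := by omega
      simp [List.getD_eq_getElem?_getD, hri, List.getElem?_eq_getElem hrlt, hcne]
    · simp [List.getD_eq_getElem?_getD, hri]
  case isFalse => rfl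

-- invariant of B's scatter loop: lengths are preserved and each cell holds its final value
lemma scatter_spec (g : List (List Char)) (vs : List (Int × Int)) :
    ∀ (ng : List (List Char)),
    ng.length = g.length →
    (∀ i, (ng.getD i []).length = (g.getD i []).length) →
    (vs.foldl (scatterF g) ng).length = g.length ∧
    (∀ i, ((vs.foldl (scatterF g) ng).getD i []).length = (g.getD i []).length) ∧
    (∀ r c, r < g.length → c < (g.getD r []).length →
      ((vs.foldl (scatterF g) ng).getD r []).getD c '.'
        = if ((r : Int), (c : Int)) ∈ vs then (g.getD r []).getD c '.'
          else (ng.getD r []).getD c '.') := by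
  induction vs with
  | nil => intro ng h1 h2; exact ⟨h1, h2, by simp⟩
  | cons p vs ih =>
    intro ng h1 h2
    have h1' : (scatterF g ng p).length = g.length := by rw [scatterF_length]; exact h1
    have h2' : ∀ i, ((scatterF g ng p).getD i []).length = (g.getD i []).length := by
      intro i; rw [scatterF_rowlen]; exact h2 i
    obtain ⟨k1, k2, k3⟩ := ih (scatterF g ng p) h1' h2'
    refine ⟨by simpa using k1, by simpa using k2, ?_⟩
    intro r c hr hc
    simp only [List.foldl_cons]
    rw [k3 r c hr hc]
    by_cases hmem : ((r : Int), (c : Int)) ∈ vs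
    · simp [hmem]
    · by_cases hp : p = ((r : Int), (c : Int))
      · subst hp
        simp only [hmem, if_false, List.mem_cons, true_or, if_true]
        exact scatterF_getD_self g ng r c h1 hr hc (by rw [h2 r]; exact hc)
      · have hne : ((r : Int), (c : Int)) ∉ p :: vs := by
          simp only [List.mem_cons]
          rintro (h | h)
          · exact hp h.symm
          · exact hmem h
        rw [if_neg hmem, if_neg hne, scatterF_getD_ne g ng p r c h1 hp]

-- the initial grid of dots
lemma init_getD (g : List (List Char)) (r c : Nat) (hr : r < g.length) :
    (((g.map (fun row => List.replicate row.length '.')).getD r []).getD c '.') = '.' := by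
  simp only [List.getD_eq_getElem?_getD, List.getElem?_map, List.getElem?_eq_getElem hr,
    Option.map_some, Option.getD_some, List.getElem?_replicate]
  split <;> rfl

lemma g_getD (grid : List String) (i : Nat) (h : i < grid.length) :
    ((grid.map String.toList).getD i []) = grid[i].toList := by
  simp [List.getD_eq_getElem?_getD, List.getElem?_eq_getElem h]

-- ===== VERDICT (by name: the statement is the Claim_ definition above) =====
theorem removeNonLoopPipes_spec : Claim_equal_removeNonLoopPipes := by
  intro grid visited _
  unfold Spec_removeNonLoopPipes
  rw [a_eq_target, alt_eq_scatter]
  obtain ⟨k1, k2, k3⟩ := scatter_spec (grid.map String.toList) visited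
    ((grid.map String.toList).map (fun row => List.replicate row.length '.'))
    (by simp)
    (by
      intro i
      simp only [List.getD_eq_getElem?_getD, List.getElem?_map]
      cases grid[i]? <;> simp)
  apply List.ext_getElem
  · simpa [PySem.List.length_enumerate] using k1.symm
  · intro i hi1 hi2
    have higrid : i < grid.length := by simpa [PySem.List.length_enumerate] using hi1
    simp only [List.getElem_map, enum_getElem grid 0 i higrid, zero_add]
    congr 1
    -- both rows as lists of chars
    have hfi : i < (visited.foldl (scatterF (grid.map String.toList))
        ((grid.map String.toList).map (fun row => List.replicate row.length '.'))).length := by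
      rw [k1]; simpa using higrid
    have hrowD : (visited.foldl (scatterF (grid.map String.toList))
        ((grid.map String.toList).map (fun row => List.replicate row.length '.'))).getD i []
        = (visited.foldl (scatterF (grid.map String.toList))
        ((grid.map String.toList).map (fun row => List.replicate row.length '.')))[i] := by
      rw [List.getD_eq_getElem?_getD, List.getElem?_eq_getElem hfi, Option.getD_some]
    apply List.ext_getElem
    · have := k2 i
      rw [hrowD, g_getD grid i higrid] at this
      simpa [length_targetRow] using this.symm
    · intro c hc1 hc2
      have hcrow : c < grid[i].toList.length := by
        simpa [length_targetRow] using hc1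
      rw [targetRow_getElem visited i grid[i].toList c hcrow]
      have := k3 i c (by simpa using higrid) (by rwa [g_getD grid i higrid])
      rw [hrowD, g_getD grid i higrid, init_getD _ i c (by simpa using higrid)] at this
      have hval : (grid[i].toList.getD c '.') = grid[i].toList[c] := by
        simp [List.getD_eq_getElem?_getD, List.getElem?_eq_getElem hcrow]
      rw [hval] at this
      have hgoal : (visited.foldl (scatterF (grid.map String.toList))
          ((grid.map String.toList).map (fun row => List.replicate row.length '.')))[i].getD c '.'
          = (visited.foldl (scatterF (grid.map String.toList))
          ((grid.map String.toList).map (fun row => List.replicate row.length '.')))[i][c]'hc2 := by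
        rw [List.getD_eq_getElem?_getD, List.getElem?_eq_getElem hc2, Option.getD_some]
      rw [← hgoal, this]
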